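-- pv_equiv track=rewrite | github.com/bayesomicslab/pHapCompass | test/FFBS2.py | find_matchings
-- ===== SOURCE A (Python) =====
-- import itertools
--
-- def find_matchings(nodes_part1, nodes_part2):
--     # Sort both parts and remember the original indices.
--     sorted_part1 = sorted(enumerate(nodes_part1), key=lambda x: x[1])
--     sorted_part2 = sorted(enumerate(nodes_part2), key=lambda x: x[1])
--
--     # Split nodes by type and collect their original indices.
--     def split_by_type(sorted_nodes):
--         grouped = {}
--         for idx, t in sorted_nodes:
--             if t not in grouped:
--                 grouped[t] = []
--             grouped[t].append(idx)
--         return grouped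
--
--     grouped_part1 = split_by_type(sorted_part1)
--     grouped_part2 = split_by_type(sorted_part2)
--     if grouped_part1.keys() != grouped_part2.keys():
--         return []
--     if any([len((grouped_part1[i])) != len((grouped_part2[i])) for i in grouped_part1.keys()]):
--         return []
--     # Start with a single empty matching.
--     matchings = [[]]
--     for node_type, indices1 in grouped_part1.items():
--         indices2 = grouped_part2[node_type]
--
--         # For each current matching, extend it with all possible permutations for the current type.
--         new_matchings = []
--         for perm in itertools.permutations(indices2, len(indices2)):
--             for current_matching in matchings:
--                 # Add new matching to the results only if it doesn't conflict with the current matching.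
--                 if all((i1, i2) not in current_matching for i1, i2 in zip(indices1, perm)):
--                     new_matchings.append(current_matching + list(zip(indices1, perm)))
--         matchings = new_matchings
--
--     return matchings
-- ===== SOURCE B (Python) =====
-- import itertools
--
-- def find_matchings(nodes_part1, nodes_part2):
--     # One whole-multiset check replaces A's grouped key/size comparisons.
--     if sorted(nodes_part1) != sorted(nodes_part2):
--         return []
--
--     def rec(types):
--         if not types:
--             return [[]]
--         t = types[0]
--         idx1 = [i for i, v in enumerate(nodes_part1) if v == t]
--         idx2 = [i for i, v in enumerate(nodes_part2) if v == t]
--         return [list(zip(idx1, perm)) + tail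
--                 for tail in rec(types[1:])
--                 for perm in itertools.permutations(idx2)]
--
--     return rec(sorted(set(nodes_part1)))
-- ===== Notes on version B (the rewrite author's own statement) =====
-- stated objective: simpler
-- what changed: B drops A's sort-with-indices/dict-grouping preprocessing and incremental matchings loop (with its always-true conflict check) in favour of one sorted-multiset equality guard plus a recursion over the sorted distinct types that builds each matching by list comprehension.
import Mathlib
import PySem

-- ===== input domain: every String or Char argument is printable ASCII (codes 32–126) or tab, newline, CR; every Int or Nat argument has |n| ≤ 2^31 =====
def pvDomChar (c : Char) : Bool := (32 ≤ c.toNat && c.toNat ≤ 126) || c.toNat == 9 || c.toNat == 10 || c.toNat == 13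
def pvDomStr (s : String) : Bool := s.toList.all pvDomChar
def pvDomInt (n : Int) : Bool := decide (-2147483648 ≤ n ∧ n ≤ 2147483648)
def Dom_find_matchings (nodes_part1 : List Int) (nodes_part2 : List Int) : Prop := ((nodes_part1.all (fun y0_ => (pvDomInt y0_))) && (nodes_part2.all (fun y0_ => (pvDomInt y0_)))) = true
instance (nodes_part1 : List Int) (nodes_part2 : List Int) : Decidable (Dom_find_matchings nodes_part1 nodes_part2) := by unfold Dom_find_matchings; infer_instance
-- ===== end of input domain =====

-- B replaces A's sort/group-by-dict preprocessing and incremental matchings loop by one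
-- sorted-multiset guard and a recursion over the sorted distinct types; objective: simpler, same results.

-- ===== PORT A =====
-- split_by_type: A's inner helper
def pvSplitStep (grouped : PySem.Dict Int (List Int)) (p : Int × Int) : PySem.Dict Int (List Int) :=
  (if grouped.contains p.2 then grouped else grouped.insert p.2 []).modify p.2 [] (fun l => l ++ [p.1])

def pvSplitByType (sorted_nodes : List (Int × Int)) : PySem.Dict Int (List Int) :=
  sorted_nodes.foldl pvSplitStep PySem.Dict.empty

def find_matchings (nodes_part1 : List Int) (nodes_part2 : List Int) : List (List (Int × Int)) :=
  let sorted_part1 := PySem.List.sorted (PySem.List.enumerate nodes_part1) (fun x => x.2)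
  let sorted_part2 := PySem.List.sorted (PySem.List.enumerate nodes_part2) (fun x => x.2)
  let grouped_part1 := pvSplitByType sorted_part1
  let grouped_part2 := pvSplitByType sorted_part2
  if !(PySem.Set.equal grouped_part1.keys grouped_part2.keys) then []
  else if (grouped_part1.keys.map (fun i =>
            decide ((grouped_part1.getD i []).length ≠ (grouped_part2.getD i []).length))).any (fun b => b) then []
  else
    -- grouped_part2[node_type]: ported as getD; the key is present here (keys checked equal above)
    grouped_part1.items.foldl (fun matchings ti =>
      (PySem.List.permutations (grouped_part2.getD ti.1 []) (grouped_part2.getD ti.1 []).length).foldl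
        (fun new_matchings perm =>
          matchings.foldl (fun nm current_matching =>
            if (ti.2.zip perm).all (fun q => !current_matching.contains q)
            then nm ++ [current_matching ++ ti.2.zip perm] else nm) new_matchings) []) [[]]

-- ===== PORT B =====
-- [i for i, v in enumerate(nodes) if v == t]
def pvIdxOf (nodes : List Int) (t : Int) : List Int :=
  ((PySem.List.enumerate nodes).filter (fun iv => iv.2 == t)).map (fun iv => iv.1)

-- B's inner 'rec': structural recursion over the remaining types
def pvTypesRec (p1 p2 : List Int) : List Int → List (List (Int × Int))
  | [] => [[]]
  | t :: rest =>
    let idx1 := pvIdxOf p1 t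
    let idx2 := pvIdxOf p2 t
    (pvTypesRec p1 p2 rest).flatMap (fun tail =>
      (PySem.List.permutations idx2 idx2.length).map (fun perm => idx1.zip perm ++ tail))

def find_matchings_alt (nodes_part1 : List Int) (nodes_part2 : List Int) : List (List (Int × Int)) :=
  if PySem.List.sorted nodes_part1 (fun x => x) ≠ PySem.List.sorted nodes_part2 (fun x => x) then []
  else pvTypesRec nodes_part1 nodes_part2 (PySem.List.sorted (PySem.Set.ofList nodes_part1) (fun x => x))

-- ===== PRECONDITION & SPEC =====
def Spec_find_matchings (nodes_part1 : List Int) (nodes_part2 : List Int) (out : List (List (Int × Int))) : Prop := out = find_matchings_alt nodes_part1 nodes_part2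
instance (nodes_part1 : List Int) (nodes_part2 : List Int) (out : List (List (Int × Int))) : Decidable (Spec_find_matchings nodes_part1 nodes_part2 out) := by unfold Spec_find_matchings; infer_instance

-- ===== CLAIM (what is proved, stated in full; the proofs are below) =====
def Claim_equal_find_matchings : Prop := ∀ (nodes_part1 : List Int) (nodes_part2 : List Int), Dom_find_matchings nodes_part1 nodes_part2 → Spec_find_matchings nodes_part1 nodes_part2 (find_matchings nodes_part1 nodes_part2)

-- ===== LEMMAS AND PROOFS =====

-- A's step over one type group, after the two inner appending loops are recognised as filter/map/flatMap
def pvStepA (g2 : PySem.Dict Int (List Int)) (ms : List (List (Int × Int))) (ti : Int × List Int) : List (List (Int × Int)) :=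
  (PySem.List.permutations (g2.getD ti.1 []) (g2.getD ti.1 []).length).flatMap
    (fun perm => (ms.filter (fun cur => (ti.2.zip perm).all (fun q => !cur.contains q))).map
      (fun cur => cur ++ ti.2.zip perm))

-- the same step with the (always-true) conflict filter dropped
def pvStepP (g2 : PySem.Dict Int (List Int)) (ms : List (List (Int × Int))) (ti : Int × List Int) : List (List (Int × Int)) :=
  (PySem.List.permutations (g2.getD ti.1 []) (g2.getD ti.1 []).length).flatMap
    (fun perm => ms.map (fun cur => cur ++ ti.2.zip perm))

-- B's per-type choice list, and the generic form of B's recursion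
def pvZips (p1 p2 : List Int) (t : Int) : List (List (Int × Int)) :=
  (PySem.List.permutations (pvIdxOf p2 t) (pvIdxOf p2 t).length).map (fun perm => (pvIdxOf p1 t).zip perm)

def pvRec (zips : Int → List (List (Int × Int))) : List Int → List (List (Int × Int))
  | [] => [[]]
  | t :: ts => (pvRec zips ts).flatMap (fun tail => (zips t).map (fun z => z ++ tail))

lemma pv_keys_step (d : PySem.Dict Int (List Int)) (p : Int × Int) :
    (pvSplitStep d p).keys = PySem.Set.add d.keys p.2 := by
  unfold pvSplitStep
  by_cases hc : d.contains p.2 = true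
  · have hm : p.2 ∈ d.keys := (PySem.Dict.contains_iff_mem_keys d p.2).1 hc
    simp [hc, PySem.Dict.keys_modify, PySem.Dict.keys_insert_of_contains _ _ hc,
      PySem.Set.add, PySem.Set.contains, hm]
  · have hc' : d.contains p.2 = false := by simpa using hc
    have hm : p.2 ∉ d.keys := fun h => by
      simp [(PySem.Dict.contains_iff_mem_keys d p.2).2 h] at hc
    simp [hc', PySem.Dict.keys_modify,
      PySem.Dict.keys_insert_of_contains _ _ (PySem.Dict.contains_insert_self d p.2 []),
      PySem.Dict.keys_insert_of_not_contains d [] hc',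
      PySem.Set.add, PySem.Set.contains, hm]

lemma pv_keys_splitFold (L : List (Int × Int)) (d : PySem.Dict Int (List Int)) :
    (L.foldl pvSplitStep d).keys = PySem.Set.update d.keys (L.map (·.2)) := by
  induction L generalizing d with
  | nil => rfl
  | cons p L ih => simp [List.foldl_cons, ih, pv_keys_step, PySem.Set.update]

lemma pv_nodup_keys_split (L : List (Int × Int)) : (pvSplitByType L).keys.Nodup := by
  unfold pvSplitByType
  rw [pv_keys_splitFold]
  exact PySem.Set.nodup_update _ _ PySem.Dict.nodup_keys_empty

lemma pv_getD_splitFold (L : List (Int × Int)) (d : PySem.Dict Int (List Int)) (t : Int) :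
    (L.foldl pvSplitStep d).getD t [] = d.getD t [] ++ (L.filter (fun p => p.2 == t)).map (·.1) := by
  induction L generalizing d with
  | nil => simp
  | cons p L ih =>
    simp only [List.foldl_cons, ih]
    by_cases ht : t = p.2
    · subst ht
      by_cases hc : d.contains p.2 = true
      · simp [pvSplitStep, hc]
      · have hc' : d.contains p.2 = false := by simpa using hc
        simp [pvSplitStep, hc', PySem.Dict.getD_of_not_contains _ _ hc']
    · have ht' : ¬ (p.2 = t) := fun h => ht h.symm
      by_cases hc : d.contains p.2 = true <;>
        simp [pvSplitStep, hc, ht, ht', PySem.Dict.getD_modify, PySem.Dict.getD_insert]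

lemma pv_nodup_flatten_values (L : List (Int × Int)) (h : (L.map (·.1)).Nodup) :
    (((pvSplitByType L).items.map (·.2)).flatten).Nodup := by
  have hk := pv_nodup_keys_split L
  have hv : (pvSplitByType L).items.map (·.2) = (pvSplitByType L).values := rfl
  rw [hv, PySem.Dict.values_eq_map_keys _ hk ([] : List Int)]
  have hg : ∀ t : Int, (pvSplitByType L).getD t [] = (L.filter (fun p => p.2 == t)).map (·.1) := by
    intro t
    unfold pvSplitByType
    rw [pv_getD_splitFold, PySem.Dict.getD_empty, List.nil_append]
  rw [List.nodup_flatten]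
  constructor
  · intro l hl
    obtain ⟨t, _, rfl⟩ := List.mem_map.1 hl
    rw [hg]
    refine List.Sublist.nodup ?_ h
    exact List.filter_sublist.map _
  · rw [List.pairwise_map]
    refine hk.imp ?_
    intro a b hab x hxa hxb
    rw [hg] at hxa hxb
    obtain ⟨p, hp, hp1⟩ := List.mem_map.1 hxa
    obtain ⟨q, hq, hq1⟩ := List.mem_map.1 hxb
    have hpa : p.2 = a := by simpa using (List.mem_filter.1 hp).2
    have hqb : q.2 = b := by simpa using (List.mem_filter.1 hq).2
    have hpq : p = q := List.inj_on_of_nodup_map h (List.mem_filter.1 hp).1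
      (List.mem_filter.1 hq).1 (hp1.trans hq1.symm)
    exact hab (hpa ▸ hqb ▸ congrArg (·.2) hpq)

lemma pv_fold_filter_eq (g2 : PySem.Dict Int (List Int)) (gs : List (Int × List Int))
    (ms : List (List (Int × Int)))
    (hnd : ((gs.map (·.2)).flatten).Nodup)
    (hms : ∀ cur ∈ ms, ∀ q : Int × Int, q ∈ cur → q.1 ∉ (gs.map (·.2)).flatten) :
    gs.foldl (pvStepA g2) ms = gs.foldl (pvStepP g2) ms := by
  induction gs generalizing ms with
  | nil => rfl
  | cons ti gs ih =>
    have hflat : ((ti :: gs).map (·.2)).flatten = ti.2 ++ (gs.map (·.2)).flatten := by simp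
    rw [hflat] at hnd hms
    have hdisj : ∀ a ∈ ti.2, a ∉ (gs.map (·.2)).flatten :=
      fun a ha => (List.disjoint_of_nodup_append hnd) ha
    have hzip : ∀ (perm : List Int) (q : Int × Int), q ∈ ti.2.zip perm → q.1 ∈ ti.2 := by
      intro perm q hq
      obtain ⟨a, b⟩ := q
      exact (List.of_mem_zip hq).1
    have hstep : pvStepA g2 ms ti = pvStepP g2 ms ti := by
      unfold pvStepA pvStepP
      apply List.flatMap_congr
      intro perm _
      congr 1
      rw [List.filter_eq_self]
      intro cur hcur
      rw [List.all_eq_true]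
      intro q hq
      simp only [Bool.not_eq_eq_eq_not, Bool.not_true, List.contains_eq_mem, decide_eq_false_iff_not]
      intro hmem
      exact (hms cur hcur q hmem) (List.mem_append.2 (Or.inl (hzip perm q hq)))
    simp only [List.foldl_cons, hstep]
    apply ih
    · exact (List.nodup_append.1 hnd).2.1
    · intro cur' hcur' q hq'
      simp only [pvStepP, List.mem_flatMap, List.mem_map] at hcur'
      obtain ⟨perm, _, cur, hcur, rfl⟩ := hcur'
      rcases List.mem_append.1 hq' with hql | hqr
      · exact fun hmem => (hms cur hcur q hql) (List.mem_append.2 (Or.inr hmem))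
      · exact hdisj q.1 (hzip perm q hqr)

-- ---- stability of PySem's insertion sort w.r.t. one key value ----

lemma pv_insertBy_pairwise {A : Type} (key : A -> Int) (x : A) (ys : List A)
    (h : ys.Pairwise (fun a b => key a ≤ key b)) :
    (PySem.List.insertBy (fun a b => decide (key a < key b)) x ys).Pairwise (fun a b => key a ≤ key b) := by
  induction ys with
  | nil => simp [PySem.List.insertBy]
  | cons y ys ih =>
    rw [List.pairwise_cons] at h
    simp only [PySem.List.insertBy]
    split_ifs with hlt
    · simp only [decide_eq_true_eq] at hlt
      refine List.pairwise_cons.2 ⟨?_, List.pairwise_cons.2 h⟩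
      intro z hz
      rcases List.mem_cons.1 hz with rfl | hz'
      · exact le_of_lt hlt
      · exact le_trans (le_of_lt hlt) (h.1 z hz')
    · simp only [decide_eq_true_eq, not_lt] at hlt
      refine List.pairwise_cons.2 ⟨?_, ih h.2⟩
      intro z hz
      rcases (PySem.List.mem_insertBy _ _ _ _).1 hz with rfl | hz'
      · exact hlt
      · exact h.1 z hz'

lemma pv_filter_pos {A : Type} (key : A -> Int) (t : Int) (a : A) (l : List A)
    (ha : (key a == t) = true) :
    (a :: l).filter (fun p => key p == t) = a :: l.filter (fun p => key p == t) :=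
  List.filter_cons_of_pos ha

lemma pv_filter_neg {A : Type} (key : A -> Int) (t : Int) (a : A) (l : List A)
    (ha : ¬ (key a == t) = true) :
    (a :: l).filter (fun p => key p == t) = l.filter (fun p => key p == t) :=
  List.filter_cons_of_neg (by simpa using ha)

lemma pv_insertBy_filter {A : Type} (key : A -> Int) (t : Int) (x : A) (ys : List A)
    (h : ys.Pairwise (fun a b => key a ≤ key b)) :
    (PySem.List.insertBy (fun a b => decide (key a < key b)) x ys).filter (fun p => key p == t)
      = if key x == t then ys.filter (fun p => key p == t) ++ [x]
        else ys.filter (fun p => key p == t) := by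
  induction ys with
  | nil =>
    simp only [PySem.List.insertBy, List.filter_nil]
    by_cases hx : (key x == t) = true
    · simp [hx]
    · simp [hx]
  | cons y ys ih =>
    rw [List.pairwise_cons] at h
    simp only [PySem.List.insertBy]
    by_cases hlt : (decide (key x < key y)) = true
    · rw [if_pos hlt]
      simp only [decide_eq_true_eq] at hlt
      by_cases hx : (key x == t) = true
      · have hxx := beq_iff_eq.1 hx
        have hrest : (y :: ys).filter (fun p => key p == t) = [] := by
          rw [List.filter_eq_nil_iff]
          intro z hz
          have hzlt : key x < key z := by
            rcases List.mem_cons.1 hz with rfl | hz'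
            · exact hlt
            · exact lt_of_lt_of_le hlt (h.1 z hz')
          simp only [beq_iff_eq]
          omega
        rw [pv_filter_pos key t x _ hx, hrest]
        simp [hx]
      · rw [pv_filter_neg key t x _ hx, if_neg hx]
    · rw [if_neg hlt]
      by_cases hy : (key y == t) = true
      · rw [pv_filter_pos key t y _ hy, pv_filter_pos key t y _ hy, ih h.2]
        by_cases hx : (key x == t) = true
        · rw [if_pos hx, if_pos hx, List.cons_append]
        · rw [if_neg hx, if_neg hx]
      · rw [pv_filter_neg key t y _ hy, pv_filter_neg key t y _ hy, ih h.2]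

lemma pv_foldl_insert_filter {A : Type} (key : A -> Int) (t : Int) (xs : List A) (acc : List A)
    (hacc : acc.Pairwise (fun a b => key a ≤ key b)) :
    (xs.foldl (fun a x => PySem.List.insertBy (fun a b => decide (key a < key b)) x a) acc).filter
        (fun p => key p == t)
      = acc.filter (fun p => key p == t) ++ xs.filter (fun p => key p == t) := by
  induction xs generalizing acc with
  | nil => simp
  | cons x xs ih =>
    rw [List.foldl_cons, ih _ (pv_insertBy_pairwise key x acc hacc),
      pv_insertBy_filter key t x acc hacc]
    by_cases hx : (key x == t) = true
    · rw [if_pos hx, pv_filter_pos key t x _ hx, List.append_assoc, List.singleton_append]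
    · rw [if_neg hx, pv_filter_neg key t x _ hx]

lemma pv_sorted_filter {A : Type} (key : A -> Int) (t : Int) (xs : List A) :
    (PySem.List.sorted xs key).filter (fun p => key p == t) = xs.filter (fun p => key p == t) := by
  rw [PySem.List.sorted_eq_foldl_insertBy, pv_foldl_insert_filter key t xs [] (List.Pairwise.nil)]
  simp

-- ---- the grouped dict of a part, in terms of B's pvIdxOf and the sorted type list ----

lemma pv_getD_split (p : List Int) (t : Int) :
    (pvSplitByType (PySem.List.sorted (PySem.List.enumerate p) (fun x => x.2))).getD t []
      = pvIdxOf p t := by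
  unfold pvSplitByType pvIdxOf
  rw [pv_getD_splitFold, PySem.Dict.getD_empty, List.nil_append,
    pv_sorted_filter (fun x : Int × Int => x.2) t (PySem.List.enumerate p)]

lemma pv_map_snd_sorted (p : List Int) :
    (PySem.List.sorted (PySem.List.enumerate p) (fun x => x.2)).map (·.2)
      = PySem.List.sorted p (fun x => x) := by
  refine (PySem.List.sorted_id_eq_of_perm_of_pairwise _ _ ?_ ?_).symm
  · exact ((PySem.List.sorted_perm (PySem.List.enumerate p) (fun x => x.2) false).map _).trans
      (by rw [PySem.List.map_snd_enumerate])
  · exact PySem.List.sorted_map_key_pairwise _ _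

lemma pv_ofList_sublist {A : Type} [BEq A] (xs : List A) : (PySem.Set.ofList xs).Sublist xs := by
  suffices h : ∀ (s : List A), (xs.foldl PySem.Set.add s).Sublist (s ++ xs) by
    simpa using h []
  induction xs with
  | nil => simp
  | cons x xs ih =>
    intro s
    rw [List.foldl_cons]
    refine (ih (PySem.Set.add s x)).trans ?_
    unfold PySem.Set.add
    split_ifs
    · exact List.Sublist.append_left (List.sublist_cons_self x xs) s
    · simp [List.append_assoc]

lemma pv_keys_split (p : List Int) :
    (pvSplitByType (PySem.List.sorted (PySem.List.enumerate p) (fun x => x.2))).keys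
      = PySem.List.sorted (PySem.Set.ofList p) (fun x => x) := by
  unfold pvSplitByType
  rw [pv_keys_splitFold]
  have h1 : PySem.Set.update (PySem.Dict.empty : PySem.Dict Int (List Int)).keys
      ((PySem.List.sorted (PySem.List.enumerate p) (fun x => x.2)).map (·.2))
      = PySem.Set.ofList (PySem.List.sorted p (fun x => x)) := by
    rw [pv_map_snd_sorted]; rfl
  rw [h1]
  refine (PySem.List.sorted_eq_of_perm_of_pairwise_lt _ _ _ ?_ ?_).symm
  · refine (List.perm_ext_iff_of_nodup (PySem.Set.nodup_ofList _) (PySem.Set.nodup_ofList _)).2 ?_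
    intro x
    rw [PySem.Set.mem_ofList, PySem.Set.mem_ofList, PySem.List.mem_sorted]
  · have hle : (PySem.Set.ofList (PySem.List.sorted p (fun x => x))).Pairwise (fun a b : Int => a ≤ b) :=
      (PySem.List.sorted_pairwise p (fun x => x)).sublist (pv_ofList_sublist _)
    have hne : (PySem.Set.ofList (PySem.List.sorted p (fun x => x))).Pairwise (fun a b : Int => a ≠ b) :=
      PySem.Set.nodup_ofList _
    exact (hle.and hne).imp (fun h => lt_of_le_of_ne h.1 h.2)

lemma pv_idx_len (p : List Int) (t : Int) : (pvIdxOf p t).length = p.count t := by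
  unfold pvIdxOf
  rw [List.length_map, ← List.countP_eq_length_filter]
  have h : (PySem.List.enumerate p).countP (fun iv => iv.2 == t)
      = ((PySem.List.enumerate p).map (·.2)).countP (fun v => v == t) := by
    rw [List.countP_map]; rfl
  rw [h, PySem.List.map_snd_enumerate]
  rfl

lemma pv_items_eq (d : PySem.Dict Int (List Int)) (h : d.keys.Nodup) :
    d.items = d.keys.map (fun k => (k, d.getD k [])) := by
  have hz : d.items = (d.items.map Prod.fst).zip (d.items.map Prod.snd) := by
    rw [List.zip_map']
    simp
  have hk : d.items.map Prod.fst = d.keys := rfl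
  have hv : d.items.map Prod.snd = d.values := rfl
  rw [hz, hk, hv, PySem.Dict.values_eq_map_keys d h ([] : List Int),
    show d.keys = d.keys.map id by rw [List.map_id], List.map_map, List.zip_map', List.map_map]
  rfl

-- ---- B's recursion versus the product fold ----

lemma pv_typesRec_eq (p1 p2 : List Int) (ts : List Int) :
    pvTypesRec p1 p2 ts = pvRec (pvZips p1 p2) ts := by
  induction ts with
  | nil => rfl
  | cons t ts ih =>
    simp only [pvTypesRec, pvRec, ih, pvZips]
    apply List.flatMap_congr
    intro tail _
    rw [List.map_map]
    rfl

lemma pv_foldl_rec (zips : Int -> List (List (Int × Int))) (ts : List Int)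
    (ms : List (List (Int × Int))) :
    ts.foldl (fun ms t => (zips t).flatMap (fun z => ms.map (fun cur => cur ++ z))) ms
      = (pvRec zips ts).flatMap (fun tail => ms.map (fun cur => cur ++ tail)) := by
  induction ts generalizing ms with
  | nil => simp [pvRec]
  | cons t ts ih =>
    rw [List.foldl_cons, ih]
    simp only [pvRec, List.flatMap_assoc, List.map_flatMap, List.flatMap_map, List.map_map]
    apply List.flatMap_congr
    intro tail _
    apply List.flatMap_congr
    intro z _
    simp [Function.comp, List.append_assoc]

-- ===== VERDICT (by name: the statement is the Claim_ definition above) =====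
theorem find_matchings_spec : Claim_equal_find_matchings := by
  intro p1 p2 _hdom
  unfold Spec_find_matchings find_matchings find_matchings_alt
  simp only []
  set S1 := PySem.List.sorted (PySem.List.enumerate p1) (fun x => x.2) with hS1
  set S2 := PySem.List.sorted (PySem.List.enumerate p2) (fun x => x.2) with hS2
  set g1 := pvSplitByType S1 with hg1d
  set g2 := pvSplitByType S2 with hg2d
  have hk1 : g1.keys = PySem.List.sorted (PySem.Set.ofList p1) (fun x => x) := pv_keys_split p1
  have hk2 : g2.keys = PySem.List.sorted (PySem.Set.ofList p2) (fun x => x) := pv_keys_split p2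
  have hd1 : ∀ t, g1.getD t [] = pvIdxOf p1 t := fun t => pv_getD_split p1 t
  have hd2 : ∀ t, g2.getD t [] = pvIdxOf p2 t := fun t => pv_getD_split p2 t
  have hmemk1 : ∀ t : Int, t ∈ g1.keys ↔ t ∈ p1 := by
    intro t
    rw [hk1, PySem.List.mem_sorted, PySem.Set.mem_ofList]
  have hmemk2 : ∀ t : Int, t ∈ g2.keys ↔ t ∈ p2 := by
    intro t
    rw [hk2, PySem.List.mem_sorted, PySem.Set.mem_ofList]
  by_cases hperm : p1.Perm p2
  · -- the two parts are a permutation of each other: both guards of A pass, B takes its main branch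
    rw [if_neg (not_not_intro ((PySem.List.sorted_id_eq_sorted_id_iff_perm p1 p2).2 hperm))]
    have hEq : PySem.Set.equal g1.keys g2.keys = true := by
      refine (PySem.Set.equal_iff _ _).2 ?_
      intro x
      rw [hmemk1, hmemk2]
      exact hperm.mem_iff
    rw [if_neg (by simp [hEq])]
    have hAny : (g1.keys.map (fun i =>
        decide ((g1.getD i []).length ≠ (g2.getD i []).length))).any (fun b => b) = false := by
      rw [List.any_map, List.any_eq_false]
      intro t ht
      simp only [Function.comp_apply, decide_eq_true_eq, not_not]
      rw [hd1 t, hd2 t, pv_idx_len, pv_idx_len]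
      exact hperm.count_eq t
    rw [if_neg (fun hc => Bool.false_ne_true (hAny ▸ hc))]
    -- main branch
    have hfA : (fun (matchings : List (List (Int × Int))) (ti : Int × List Int) =>
        (PySem.List.permutations (g2.getD ti.1 []) (g2.getD ti.1 []).length).foldl
          (fun new_matchings perm =>
            matchings.foldl (fun nm current_matching =>
              if (ti.2.zip perm).all (fun q => !current_matching.contains q)
              then nm ++ [current_matching ++ ti.2.zip perm] else nm) new_matchings) [])
        = pvStepA g2 := by
      funext ms ti
      unfold pvStepA
      simp only [PySem.List.foldl_append_if, PySem.List.foldl_append_eq_flatMap, List.nil_append]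
    have hndfst : (S1.map (·.1)).Nodup := by
      have hp' := (PySem.List.sorted_perm (PySem.List.enumerate p1) (fun x => x.2) false).map
        (fun x : Int × Int => x.1)
      refine hp'.nodup_iff.2 ?_
      rw [PySem.List.map_fst_enumerate]
      exact PySem.List.nodup_pyRange_one _ _
    have hnd := pv_nodup_flatten_values S1 hndfst
    rw [hfA, pv_fold_filter_eq g2 g1.items [[]] hnd
      (by
        intro cur hcur q hq
        simp only [List.mem_singleton] at hcur
        subst hcur
        simp at hq),
      pv_items_eq g1 (pv_nodup_keys_split S1)]
    have hmapf : g1.keys.map (fun k => (k, g1.getD k []))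
        = g1.keys.map (fun k => (k, pvIdxOf p1 k)) :=
      List.map_congr_left (fun k _ => by rw [hd1 k])
    rw [hmapf, List.foldl_map]
    have hstep : (fun (ms : List (List (Int × Int))) (t : Int) => pvStepP g2 ms (t, pvIdxOf p1 t))
        = (fun ms t => (pvZips p1 p2 t).flatMap (fun z => ms.map (fun cur => cur ++ z))) := by
      funext ms t
      unfold pvStepP pvZips
      rw [List.flatMap_map, hd2 t]
    rw [hstep, pv_foldl_rec, hk1, ← pv_typesRec_eq]
    simp
  · -- no permutation: B's guard fires; A returns [] from one of its two guards
    rw [if_pos (fun h => hperm ((PySem.List.sorted_id_eq_sorted_id_iff_perm p1 p2).1 h))]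
    split_ifs with h1 h2
    · rfl
    · rfl
    · exfalso
      apply hperm
      have hEq : PySem.Set.equal g1.keys g2.keys = true := by
        revert h1
        cases PySem.Set.equal g1.keys g2.keys <;> simp
      simp only [List.any_map, List.any_eq_true, Function.comp_apply, decide_eq_true_eq,
        not_exists, not_and, not_not] at h2
      rw [List.perm_iff_count]
      intro t
      by_cases ht : t ∈ p1
      · have hlen := h2 t ((hmemk1 t).2 ht)
        rw [hd1 t, hd2 t, pv_idx_len, pv_idx_len] at hlen
        exact hlen
      · have ht2 : t ∉ p2 := fun hm2 =>
          ht ((hmemk1 t).1 (((PySem.Set.equal_iff _ _).1 hEq t).2 ((hmemk2 t).2 hm2)))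
        rw [List.count_eq_zero.2 ht, List.count_eq_zero.2 ht2]
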